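-- pv_equiv track=rewrite | github.com/SChapin97/advent_of_code_2022 | day_three/part_two.py | get_value_of_chars
-- ===== SOURCE A (Python) =====
-- def get_value_of_chars(input_string: str) -> int:
--     total_value: int = 0
--     for char in input_string:
--         if char.islower():
--             total_value += ord(char) - 96
--         else:
--             total_value += ord(char) - 38
--
--     return total_value
-- ===== SOURCE B (Python) =====
-- def get_value_of_chars(input_string: str) -> int:
--     total = sum(map(ord, input_string))
--     lowers = sum(1 for c in input_string if c.islower())
--     return total - 96 * lowers - 38 * (len(input_string) - lowers)
-- ===== Notes on version B (the rewrite author's own statement) =====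
-- stated objective: alternative
-- what changed: Replaces the per-character branch-and-accumulate loop with aggregate sums (total of ord values, count of lowercase chars) combined by a closed-form correction total - 96*lowers - 38*(len - lowers).
import Mathlib
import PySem

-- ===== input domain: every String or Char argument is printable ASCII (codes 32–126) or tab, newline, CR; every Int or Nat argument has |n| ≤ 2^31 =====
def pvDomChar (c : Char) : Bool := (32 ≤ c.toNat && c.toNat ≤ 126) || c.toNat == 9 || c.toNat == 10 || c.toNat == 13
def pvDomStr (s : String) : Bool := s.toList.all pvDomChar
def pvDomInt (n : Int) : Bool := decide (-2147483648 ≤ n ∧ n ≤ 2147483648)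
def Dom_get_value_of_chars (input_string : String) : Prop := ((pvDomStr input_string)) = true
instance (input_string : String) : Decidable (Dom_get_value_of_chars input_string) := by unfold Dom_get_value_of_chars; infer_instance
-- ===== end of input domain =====

-- ===== PORT A =====
-- B replaces A's branch-and-accumulate loop by aggregate sums plus a closed-form correction (alternative decomposition).
def get_value_of_chars (input_string : String) : Int :=
  input_string.toList.foldl
    (fun total_value char =>
      if PySem.Chars.islower char then total_value + ((char.toNat : Int) - 96)
      else total_value + ((char.toNat : Int) - 38)) 0

-- ===== PORT B =====
def get_value_of_chars_alt (input_string : String) : Int :=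
  let cs := input_string.toList
  let total : Int := (cs.map (fun c => (c.toNat : Int))).sum
  let lowers : Int := ((cs.filter PySem.Chars.islower).length : Int)
  total - 96 * lowers - 38 * ((cs.length : Int) - lowers)

-- ===== PRECONDITION & SPEC =====
def Spec_get_value_of_chars (input_string : String) (out : Int) : Prop := out = get_value_of_chars_alt input_string
instance (input_string : String) (out : Int) : Decidable (Spec_get_value_of_chars input_string out) := by unfold Spec_get_value_of_chars; infer_instance

-- ===== CLAIM =====
def Claim_equal_get_value_of_chars : Prop := ∀ (input_string : String), Dom_get_value_of_chars input_string → Spec_get_value_of_chars input_string (get_value_of_chars input_string)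

-- ===== LEMMAS AND PROOFS =====
theorem gvoc_foldl_eq (cs : List Char) (acc : Int) :
    cs.foldl
      (fun total_value char =>
        if PySem.Chars.islower char then total_value + ((char.toNat : Int) - 96)
        else total_value + ((char.toNat : Int) - 38)) acc
    = acc + (cs.map (fun c => (c.toNat : Int))).sum
        - 96 * ((cs.filter PySem.Chars.islower).length : Int)
        - 38 * ((cs.length : Int) - ((cs.filter PySem.Chars.islower).length : Int)) := by
  induction cs generalizing acc with
  | nil => simp
  | cons c cs ih =>
    simp only [List.foldl_cons, List.map_cons, List.sum_cons, List.filter_cons, List.length_cons]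
    by_cases h : PySem.Chars.islower c = true
    · simp only [h, if_true, ih, List.length_cons]
      push_cast
      ring
    · simp only [h, if_false, Bool.false_eq_true, ih]
      push_cast
      ring

-- ===== VERDICT =====
theorem get_value_of_chars_spec : Claim_equal_get_value_of_chars := by
  intro s _
  unfold Spec_get_value_of_chars get_value_of_chars get_value_of_chars_alt
  simpa using gvoc_foldl_eq s.toList 0
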